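-- pv_equiv track=rewrite | github.com/sander110419/Netbox-Cisco-ISE | ISE_to_Netbox.py | parse_device_type
-- ===== SOURCE A (Python) =====
-- def parse_device_type(device_groups):
--     """Parse device type from device groups"""
--     device_type = "Unknown"
--
--     for group in device_groups:
--         if group.startswith("Device Type#"):
--             parts = group.split('#')
--             if len(parts) > 2:
--                 # Get the last part of the device type hierarchy
--                 device_type = parts[-1]
--
--     return device_type
-- ===== SOURCE B (Python) =====
-- def parse_device_type(device_groups):
--     """Parse device type from device groups"""
--     for group in reversed(device_groups):
--         if group.startswith("Device Type#"):
--             parts = group.split('#')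
--             if len(parts) > 2:
--                 return parts[-1]
--     return "Unknown"
-- ===== Notes on version B (the rewrite author's own statement) =====
-- stated objective: idiomatic
-- what changed: Replaces the forward scan-and-overwrite accumulator with a reverse scan that returns the first matching group immediately (last forward match = first reverse match), dropping the mutable default variable.
import Mathlib
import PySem

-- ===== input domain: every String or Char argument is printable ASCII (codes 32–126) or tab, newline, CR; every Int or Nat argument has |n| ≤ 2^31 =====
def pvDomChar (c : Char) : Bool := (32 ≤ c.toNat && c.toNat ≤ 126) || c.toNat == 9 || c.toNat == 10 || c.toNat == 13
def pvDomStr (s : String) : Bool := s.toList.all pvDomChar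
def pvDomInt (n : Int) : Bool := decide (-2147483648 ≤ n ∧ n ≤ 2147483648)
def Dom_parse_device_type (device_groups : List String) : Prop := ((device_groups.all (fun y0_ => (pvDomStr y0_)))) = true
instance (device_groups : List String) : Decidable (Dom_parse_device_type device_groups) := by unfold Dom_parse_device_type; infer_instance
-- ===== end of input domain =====

-- B scans in reverse and returns the first match (the forward scan's last overwrite), dropping the accumulator; idiomatic, same cost.

-- ===== PORT A =====
-- forward loop, overwriting device_type on each matching group
def parse_device_type (device_groups : List String) : String :=
  device_groups.foldl (fun device_type group =>
    if PySem.Str.startswith group "Device Type#" then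
      let parts := (PySem.Str.split? group "#").getD []
      if parts.length > 2 then
        -- parts[-1]: parts is nonempty here (length > 2), so pyGet? is some; getD is unreachable
        (PySem.List.pyGet? parts (-1)).getD device_type
      else device_type
    else device_type) "Unknown"

-- ===== PORT B =====
-- reverse scan, return first matching group's last part
def pdtScan : List String → String
  | [] => "Unknown"
  | group :: rest =>
    if PySem.Str.startswith group "Device Type#" then
      let parts := (PySem.Str.split? group "#").getD []
      if parts.length > 2 then (PySem.List.pyGet? parts (-1)).getD "Unknown"
      else pdtScan rest
    else pdtScan rest

def parse_device_type_alt (device_groups : List String) : String :=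
  pdtScan device_groups.reverse

-- ===== PRECONDITION & SPEC =====
def Spec_parse_device_type (device_groups : List String) (out : String) : Prop := out = parse_device_type_alt device_groups
instance (device_groups : List String) (out : String) : Decidable (Spec_parse_device_type device_groups out) := by unfold Spec_parse_device_type; infer_instance

-- ===== CLAIM (what is proved, stated in full; the proofs are below) =====
def Claim_equal_parse_device_type : Prop := ∀ (device_groups : List String), Dom_parse_device_type device_groups → Spec_parse_device_type device_groups (parse_device_type device_groups)

-- ===== LEMMAS AND PROOFS =====

-- A's step function, named for the lemmas
def pdtStep (device_type group : String) : String :=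
  if PySem.Str.startswith group "Device Type#" then
    let parts := (PySem.Str.split? group "#").getD []
    if parts.length > 2 then (PySem.List.pyGet? parts (-1)).getD device_type
    else device_type
  else device_type

-- pdtScan with an arbitrary default, to generalize the accumulator
def pdtScanD : List String → String → String
  | [], acc => acc
  | group :: rest, acc =>
    if PySem.Str.startswith group "Device Type#" then
      let parts := (PySem.Str.split? group "#").getD []
      if parts.length > 2 then (PySem.List.pyGet? parts (-1)).getD acc
      else pdtScanD rest acc
    else pdtScanD rest acc

theorem pdtScanD_eq_scan (l : List String) : pdtScanD l "Unknown" = pdtScan l := by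
  induction l with
  | nil => rfl
  | cons g rest ih =>
    simp only [pdtScanD, pdtScan]
    split_ifs with h1 h2 <;> simp_all

theorem pdtScanD_append (xs : List String) (g acc : String) :
    pdtScanD (xs ++ [g]) acc = pdtScanD xs (pdtStep acc g) := by
  induction xs with
  | nil =>
    simp only [List.nil_append, pdtScanD, pdtStep]
  | cons x rest ih =>
    simp only [List.cons_append, pdtScanD, ih]
    split_ifs with h1 h2
    · -- matched: the getD default differs but pyGet? is some since parts nonempty
      have hne : (PySem.Str.split? x "#").getD [] ≠ [] := by
        intro h; simp [h] at h2
      obtain ⟨v, hv⟩ : ∃ v, PySem.List.pyGet? ((PySem.Str.split? x "#").getD []) (-1) = some v := by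
        rcases ((PySem.Str.split? x "#").getD []).eq_nil_or_concat with h | ⟨ys, y, h⟩
        · exact absurd h hne
        · exact ⟨y, by rw [h]; simp [PySem.List.pyGet?, PySem.List.pyIdx?]⟩
      simp [hv]
    · rfl
    · rfl

theorem pdt_fold_eq (l : List String) (acc : String) :
    l.foldl pdtStep acc = pdtScanD l.reverse acc := by
  induction l generalizing acc with
  | nil => rfl
  | cons g rest ih =>
    simp only [List.foldl_cons, List.reverse_cons, pdtScanD_append, ih]

-- ===== VERDICT (by name: the statement is the Claim_ definition above) =====
theorem parse_device_type_spec : Claim_equal_parse_device_type := by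
  intro dg _
  show parse_device_type dg = parse_device_type_alt dg
  have : parse_device_type dg = dg.foldl pdtStep "Unknown" := rfl
  rw [this, pdt_fold_eq, pdtScanD_eq_scan]
  rfl
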